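-- pv_equiv track=rewrite | github.com/mandari1ne/trainee_tasks | discount_bot_approved.py | get_shop_keyboard
-- ===== SOURCE A (Python) =====
-- def get_shop_keyboard(shops: dict) -> dict:
--     '''
--     :param shops: Dictionary (list of shops)
--     :return: Dictionary (keyboard of shops)
--
--     This method for showing shop menu.
--     '''
--
--     # initial keyboard
--     keyboard = {'inline_keyboard': []}
--
--     # getting shops
--     unique_shops = sorted(set(shop for category in shops.values() for shop in category.keys()))
--
--     # add shop in the keyboard
--     row = []
--     for i, shop in enumerate(unique_shops, 1):
--         button = {'text': shop, 'callback_data': f'shop_{shop}'}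
--         row.append(button)
--
--         # 3 buttons in the row
--         if i % 3 == 0:
--             keyboard['inline_keyboard'].append(row)
--             row = []
--
--     # if one row left
--     if row:
--         keyboard['inline_keyboard'].append(row)
--
--     keyboard['inline_keyboard'].append([{'text': 'В меню', 'callback_data': 'home'}])
--
--     return keyboard
-- ===== SOURCE B (Python) =====
-- def get_shop_keyboard(shops: dict) -> dict:
--     '''Chunk-based rebuild: slice the sorted shop list into rows of three.'''
--     unique = sorted({shop for category in shops.values() for shop in category})
--     rows = []
--     rest = unique
--     while rest:
--         head, rest = rest[:3], rest[3:]
--         rows.append([{'text': s, 'callback_data': f'shop_{s}'} for s in head])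
--     rows.append([{'text': 'В меню', 'callback_data': 'home'}])
--     return {'inline_keyboard': rows}
-- ===== Notes on version B (the rewrite author's own statement) =====
-- stated objective: alternative
-- what changed: A builds rows with a running-row accumulator and an i % 3 counter over enumerate; B slices the sorted unique shop list into chunks of three (rest[:3]/rest[3:]) with no per-element state, trading speed on large inputs for the chunk-based decomposition.
import Mathlib
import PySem

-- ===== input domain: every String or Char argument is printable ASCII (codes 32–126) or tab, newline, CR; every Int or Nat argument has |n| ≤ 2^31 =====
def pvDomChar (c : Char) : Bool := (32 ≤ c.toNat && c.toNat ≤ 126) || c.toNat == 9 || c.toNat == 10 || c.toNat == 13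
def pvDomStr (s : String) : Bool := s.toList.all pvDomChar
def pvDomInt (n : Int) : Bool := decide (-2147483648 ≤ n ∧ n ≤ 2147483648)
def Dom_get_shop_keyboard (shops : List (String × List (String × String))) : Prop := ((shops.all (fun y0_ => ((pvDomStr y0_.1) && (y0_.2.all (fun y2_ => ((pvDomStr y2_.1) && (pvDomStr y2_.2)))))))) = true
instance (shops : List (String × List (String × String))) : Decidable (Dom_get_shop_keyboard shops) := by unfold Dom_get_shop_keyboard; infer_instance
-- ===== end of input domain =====

-- B replaces A's per-button counter-and-accumulator loop with chunking: it slices the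
-- sorted unique shop list three at a time (objective: simpler decomposition, same cost).

-- ===== PORT A =====
-- button dict for one shop (A's `button = {...}` line)
def pvBtn (s : String) : List (String × String) :=
  [("text", s), ("callback_data", "shop_" ++ s)]

def pvMenuBtn : List (String × String) := [("text", "В меню"), ("callback_data", "home")]

-- sorted(set(shop for category in shops.values() for shop in category.keys()))
def pvUnique (shops : List (String × List (String × String))) : List String :=
  PySem.List.sorted
    (PySem.Set.ofList ((PySem.Dict.ofList shops).values.flatMap (fun cat => (PySem.Dict.ofList cat).keys)))
    (fun x => x) false

-- the body of A's `for i, shop in enumerate(unique_shops, 1)` loop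
def pvStepA (st : List (List (List (String × String))) × List (List (String × String)))
    (p : Int × String) : List (List (List (String × String))) × List (List (String × String)) :=
  let row' := st.2 ++ [pvBtn p.2]
  if PySem.Int.mod p.1 3 == 0 then (st.1 ++ [row'], []) else (st.1, row')

def get_shop_keyboard (shops : List (String × List (String × String))) :
    List (String × List (List (List (String × String)))) :=
  let unique_shops := pvUnique shops
  let st := (PySem.List.enumerate unique_shops 1).foldl pvStepA ([], [])
  -- if row: keyboard['inline_keyboard'].append(row)
  let rows := if st.2.isEmpty then st.1 else st.1 ++ [st.2]
  [("inline_keyboard", rows ++ [[pvMenuBtn]])]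

-- ===== PORT B =====
-- the while loop of Source B: slice off rest[:3] / rest[3:] until rest is empty
def pvChunkRows (rest : List String) : List (List (List (String × String))) :=
  if h : rest = [] then []
  else
    (PySem.List.slice rest (some 0) (some 3)).map
        (fun s => [("text", s), ("callback_data", "shop_" ++ s)]) ::
      pvChunkRows (PySem.List.slice rest (some 3) none)
termination_by rest.length
decreasing_by
  rw [PySem.List.slice_from rest (show (0:ℤ) ≤ 3 by norm_num)]
  have : rest.length ≠ 0 := fun hn => h (List.eq_nil_of_length_eq_zero hn)
  simp [List.length_drop]
  omega

def get_shop_keyboard_alt (shops : List (String × List (String × String))) :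
    List (String × List (List (List (String × String)))) :=
  let unique := PySem.List.sorted
    (PySem.Set.ofList ((PySem.Dict.ofList shops).values.flatMap (fun cat => (PySem.Dict.ofList cat).keys)))
    (fun x => x) false
  [("inline_keyboard",
    pvChunkRows unique ++ [[[("text", "В меню"), ("callback_data", "home")]]])]

-- ===== PRECONDITION & SPEC =====
def Spec_get_shop_keyboard (shops : List (String × List (String × String))) (out : List (String × List (List (List (String × String))))) : Prop := out = get_shop_keyboard_alt shops
instance (shops : List (String × List (String × String))) (out : List (String × List (List (List (String × String))))) : Decidable (Spec_get_shop_keyboard shops out) := by unfold Spec_get_shop_keyboard; infer_instance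

-- ===== CLAIM (what is proved, stated in full; the proofs are below) =====
def Claim_equal_get_shop_keyboard : Prop := ∀ (shops : List (String × List (String × String))), Dom_get_shop_keyboard shops → Spec_get_shop_keyboard shops (get_shop_keyboard shops)

-- ===== LEMMAS AND PROOFS =====

-- structural three-at-a-time chunking, proof-side mirror of pvChunkRows
def pvChunk3 : List String → List (List (List (String × String)))
  | [] => []
  | [a] => [[pvBtn a]]
  | [a, b] => [[pvBtn a, pvBtn b]]
  | a :: b :: c :: t => [pvBtn a, pvBtn b, pvBtn c] :: pvChunk3 t

lemma pvChunkRows_nil : pvChunkRows [] = [] := by rw [pvChunkRows]; simp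

lemma pvChunkRows_eq_chunk3 (l : List String) : pvChunkRows l = pvChunk3 l := by
  induction l using pvChunk3.induct with
  | case1 => exact pvChunkRows_nil
  | case2 a =>
      rw [pvChunkRows, PySem.List.slice_from _ (show (0:ℤ) ≤ 3 by norm_num)]
      simp [PySem.List.slice_to _ (show (0:ℤ) ≤ 3 by norm_num), pvChunk3, pvBtn, pvChunkRows_nil]
  | case3 a b =>
      rw [pvChunkRows, PySem.List.slice_from _ (show (0:ℤ) ≤ 3 by norm_num)]
      simp [PySem.List.slice_to _ (show (0:ℤ) ≤ 3 by norm_num), pvChunk3, pvBtn, pvChunkRows_nil]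
  | case4 a b c t ih =>
      rw [pvChunkRows, PySem.List.slice_from _ (show (0:ℤ) ≤ 3 by norm_num)]
      simp [PySem.List.slice_to _ (show (0:ℤ) ≤ 3 by norm_num), pvChunk3, pvBtn, ih]

-- A's counter loop, started at any counter i ≡ 1 (mod 3) with an empty running row,
-- appends exactly the three-at-a-time chunks.
lemma pvLoopA_eq_chunk3 (l : List String) : ∀ (i : Int) (rows : List (List (List (String × String)))),
    i % 3 = 1 →
    (let st := (PySem.List.enumerate l i).foldl pvStepA (rows, []);
     if st.2.isEmpty then st.1 else st.1 ++ [st.2]) = rows ++ pvChunk3 l := by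
  induction l using pvChunk3.induct with
  | case1 =>
      intro i rows _
      simp [PySem.List.enumerate_nil, pvChunk3]
  | case2 a =>
      intro i rows h
      have hd1 : ¬ (3:ℤ) ∣ i := by omega
      simp [PySem.List.enumerate_cons, PySem.List.enumerate_nil, pvStepA, pvChunk3, hd1]
  | case3 a b =>
      intro i rows h
      have hd1 : ¬ (3:ℤ) ∣ i := by omega
      have hd2 : ¬ (3:ℤ) ∣ (i + 1) := by omega
      simp [PySem.List.enumerate_cons, PySem.List.enumerate_nil, pvStepA, pvChunk3, hd1, hd2]
  | case4 a b c t ih =>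
      intro i rows h
      have hd1 : ¬ (3:ℤ) ∣ i := by omega
      have hd2 : ¬ (3:ℤ) ∣ (i + 1) := by omega
      have hd3 : (3:ℤ) ∣ (i + 1 + 1) := by omega
      have key := ih (i + 1 + 1 + 1) (rows ++ [[pvBtn a, pvBtn b, pvBtn c]]) (by omega)
      simp only [] at key
      simp [PySem.List.enumerate_cons, pvStepA, pvChunk3, hd1, hd2, hd3]
      simpa [List.append_assoc] using key

-- ===== VERDICT (by name: the statement is the Claim_ definition above) =====
theorem get_shop_keyboard_spec : Claim_equal_get_shop_keyboard := by
  intro shops _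
  unfold Spec_get_shop_keyboard get_shop_keyboard get_shop_keyboard_alt
  have key := pvLoopA_eq_chunk3 (pvUnique shops) 1 [] (by norm_num)
  simp only [pvUnique] at key ⊢
  rw [key, pvChunkRows_eq_chunk3]
  simp [pvMenuBtn]
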